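-- pv_equiv track=rewrite | github.com/Haksell/kep | contest_10/H.py | smart
-- ===== SOURCE A (Python) =====
-- from collections import defaultdict
-- from itertools import accumulate, combinations
-- from operator import xor
--
-- MOD = 1_000_000_007
--
-- def smart(a):
--     psum = list(accumulate(a, initial=0))
--     pxor = list(accumulate(a, xor, initial=0))
--     idx = defaultdict(list)
--     for i, px in enumerate(pxor):
--         idx[px].append(i)
--     res = 0
--     for v in idx.values():
--         acc = 0
--         for cnt, i in enumerate(v, 1):
--             acc += psum[i]
--             res += cnt * psum[i] - acc
--             res %= MOD
--     return res
-- ===== SOURCE B (Python) =====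
-- from itertools import accumulate
-- from operator import xor
--
-- MOD = 1_000_000_007
--
-- def smart(a):
--     psum = list(accumulate(a, initial=0))
--     pxor = list(accumulate(a, xor, initial=0))
--     agg = {}
--     res = 0
--     for ps, px in zip(psum, pxor):
--         c, s = agg.get(px, (0, 0))
--         res = (res + c * ps - s) % MOD
--         agg[px] = (c + 1, s + ps)
--     return res
-- ===== Notes on version B (the rewrite author's own statement) =====
-- stated objective: simpler
-- what changed: Replaced A's two-phase approach (build a defaultdict of per-xor index lists, then a nested loop over each group) with a single streaming pass that keeps a running (count, sum-of-prefix-sums) aggregate per prefix-xor value, eliminating the grouped inner loop.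
import Mathlib
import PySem

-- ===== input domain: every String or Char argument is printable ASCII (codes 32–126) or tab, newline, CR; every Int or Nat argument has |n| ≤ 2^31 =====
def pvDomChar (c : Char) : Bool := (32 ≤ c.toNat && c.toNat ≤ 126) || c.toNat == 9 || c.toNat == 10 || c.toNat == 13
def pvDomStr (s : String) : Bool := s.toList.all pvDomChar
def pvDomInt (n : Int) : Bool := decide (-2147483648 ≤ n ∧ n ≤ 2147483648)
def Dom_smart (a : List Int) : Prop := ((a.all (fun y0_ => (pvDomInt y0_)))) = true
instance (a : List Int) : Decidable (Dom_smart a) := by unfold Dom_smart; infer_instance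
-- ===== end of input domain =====

-- B replaces A's two-phase build-a-dict-of-index-lists + grouped nested loop by a single
-- streaming pass keeping per-key (count, sum-of-prefix-sums) aggregates; same return value (objective: simpler).

def MOD : Int := 1000000007

-- ===== PORT A =====
-- accumulate(a, initial=0) / accumulate(a, xor, initial=0) are ported as List.scanl (exact);
-- psum[i] is ported with pyGetD (the index is always in range here, so this is exact).
def smart (a : List Int) : Int :=
  let psum := List.scanl (· + ·) 0 a
  let pxor := List.scanl PySem.Int.bxor 0 a
  let idx : PySem.Dict Int (List Int) :=
    (PySem.List.enumerate pxor).foldl (fun d p => d.modify p.2 [] (fun v => v ++ [p.1])) PySem.Dict.empty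
  idx.values.foldl
    (fun res v =>
      ((PySem.List.enumerate v 1).foldl
        (fun (st : Int × Int) ci =>
          (st.1 + PySem.List.pyGetD psum ci.2 0,
           PySem.Int.mod (st.2 + (ci.1 * PySem.List.pyGetD psum ci.2 0 - (st.1 + PySem.List.pyGetD psum ci.2 0))) MOD))
        (0, res)).2)
    0

-- ===== PORT B =====
def smart_alt (a : List Int) : Int :=
  let psum := List.scanl (· + ·) 0 a
  let pxor := List.scanl PySem.Int.bxor 0 a
  ((psum.zip pxor).foldl
    (fun (st : PySem.Dict Int (Int × Int) × Int) p =>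
      (st.1.insert p.2 ((st.1.getD p.2 (0, 0)).1 + 1, (st.1.getD p.2 (0, 0)).2 + p.1),
       PySem.Int.mod (st.2 + ((st.1.getD p.2 (0, 0)).1 * p.1 - (st.1.getD p.2 (0, 0)).2)) MOD))
    (PySem.Dict.empty, 0)).2

-- ===== PRECONDITION & SPEC =====
def Spec_smart (a : List Int) (out : Int) : Prop := out = smart_alt a
instance (a : List Int) (out : Int) : Decidable (Spec_smart a out) := by unfold Spec_smart; infer_instance

-- ===== CLAIM (what is proved, stated in full; the proofs are below) =====
def Claim_equal_smart : Prop := ∀ (a : List Int), Dom_smart a → Spec_smart a (smart a)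

-- ===== LEMMAS AND PROOFS =====

-- proof-side reference objects: B's aggregate step and the total (un-reduced) term sum
def aggStep (d : PySem.Dict Int (Int × Int)) (p : Int × Int) : PySem.Dict Int (Int × Int) :=
  d.insert p.2 ((d.getD p.2 (0, 0)).1 + 1, (d.getD p.2 (0, 0)).2 + p.1)

def ptsum (d : PySem.Dict Int (Int × Int)) : List (Int × Int) → Int
  | [] => 0
  | p :: l => ((d.getD p.2 (0, 0)).1 * p.1 - (d.getD p.2 (0, 0)).2) + ptsum (aggStep d p) l

-- A's inner-loop total for one group, entering with counter c and running sum s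
def gsum (c s : Int) : List Int → Int
  | [] => 0
  | x :: w => (c * x - (s + x)) + gsum (c + 1) (s + x) w

-- the psum-values of the pairs whose prefix-xor is k, in order
def pgroup (k : Int) (l : List (Int × Int)) : List Int :=
  (l.filter (fun p => p.2 == k)).map (·.1)

theorem MODpos : (0 : Int) < MOD := by decide

theorem modM_zero : PySem.Int.mod 0 MOD = 0 := by decide

theorem modM_add (x t : Int) : PySem.Int.mod (PySem.Int.mod x MOD + t) MOD = PySem.Int.mod (x + t) MOD := by
  simp only [PySem.Int.mod_eq_emod_of_pos MODpos, Int.emod_add_emod]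

theorem B_loop (l : List (Int × Int)) : ∀ (d : PySem.Dict Int (Int × Int)) (x : Int),
    (l.foldl
      (fun (st : PySem.Dict Int (Int × Int) × Int) p =>
        (st.1.insert p.2 ((st.1.getD p.2 (0, 0)).1 + 1, (st.1.getD p.2 (0, 0)).2 + p.1),
         PySem.Int.mod (st.2 + ((st.1.getD p.2 (0, 0)).1 * p.1 - (st.1.getD p.2 (0, 0)).2)) MOD))
      (d, PySem.Int.mod x MOD)).2 = PySem.Int.mod (x + ptsum d l) MOD := by
  induction l with
  | nil => intro d x; simp [ptsum]
  | cons p l ih =>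
    intro d x
    simp only [List.foldl_cons, modM_add]
    rw [ih]
    simp only [ptsum, aggStep]
    congr 1
    ring

theorem smart_alt_eq (a : List Int) :
    smart_alt a = PySem.Int.mod
      (ptsum PySem.Dict.empty ((List.scanl (· + ·) 0 a).zip (List.scanl PySem.Int.bxor 0 a))) MOD := by
  show (((List.scanl (· + ·) 0 a).zip (List.scanl PySem.Int.bxor 0 a)).foldl _ (PySem.Dict.empty, 0)).2 = _
  rw [show ((PySem.Dict.empty : PySem.Dict Int (Int × Int)), (0 : Int))
      = (PySem.Dict.empty, PySem.Int.mod 0 MOD) by rw [modM_zero]]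
  rw [B_loop]
  norm_num

theorem enumerate_map (g : Int → Int) (v : List Int) : ∀ (s : Int),
    PySem.List.enumerate (v.map g) s = (PySem.List.enumerate v s).map (fun p => (p.1, g p.2)) := by
  induction v with
  | nil => intro s; simp [PySem.List.enumerate]
  | cons y v ih => intro s; simp [PySem.List.enumerate_cons, ih]

theorem A_inner (w : List Int) : ∀ (c s x : Int),
    ((PySem.List.enumerate w c).foldl
      (fun (st : Int × Int) ci =>
        (st.1 + ci.2, PySem.Int.mod (st.2 + (ci.1 * ci.2 - (st.1 + ci.2))) MOD))
      (s, PySem.Int.mod x MOD)).2 = PySem.Int.mod (x + gsum c s w) MOD := by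
  induction w with
  | nil => intro c s x; simp [PySem.List.enumerate, gsum]
  | cons y w ih =>
    intro c s x
    rw [PySem.List.enumerate_cons]
    simp only [List.foldl_cons, modM_add]
    rw [ih]
    simp only [gsum]
    congr 1
    ring

theorem A_outer (psum : List Int) (vs : List (List Int)) : ∀ (x : Int),
    vs.foldl
      (fun res v =>
        ((PySem.List.enumerate v 1).foldl
          (fun (st : Int × Int) ci =>
            (st.1 + PySem.List.pyGetD psum ci.2 0,
             PySem.Int.mod (st.2 + (ci.1 * PySem.List.pyGetD psum ci.2 0 - (st.1 + PySem.List.pyGetD psum ci.2 0))) MOD))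
          (0, res)).2)
      (PySem.Int.mod x MOD)
    = PySem.Int.mod (x + (vs.map (fun v => gsum 1 0 (v.map (fun i => PySem.List.pyGetD psum i 0)))).sum) MOD := by
  induction vs with
  | nil => intro x; simp
  | cons v vs ih =>
    intro x
    simp only [List.foldl_cons]
    have h1 : ((PySem.List.enumerate v 1).foldl
        (fun (st : Int × Int) ci =>
          (st.1 + PySem.List.pyGetD psum ci.2 0,
           PySem.Int.mod (st.2 + (ci.1 * PySem.List.pyGetD psum ci.2 0 - (st.1 + PySem.List.pyGetD psum ci.2 0))) MOD))
        (0, PySem.Int.mod x MOD)).2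
        = PySem.Int.mod (x + gsum 1 0 (v.map (fun i => PySem.List.pyGetD psum i 0))) MOD := by
      rw [← A_inner (v.map (fun i => PySem.List.pyGetD psum i 0)) 1 0 x, enumerate_map, List.foldl_map]
    rw [h1, ih]
    simp only [List.map_cons, List.sum_cons]
    congr 1
    ring

theorem getD_buildIdx (l : List (Int × Int)) (k : Int) :
    (l.foldl (fun d p => d.modify p.2 [] (fun v => v ++ [p.1])) PySem.Dict.empty).getD k []
      = (l.filter (fun p => p.2 == k)).map (·.1) := by
  have h1 : l.foldl (fun d p => d.modify p.2 [] (fun v => v ++ [p.1])) PySem.Dict.empty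
      = (l.map Prod.swap).foldl (fun d p => d.modify p.1 [] (fun v => v ++ [p.2])) PySem.Dict.empty := by
    rw [List.foldl_map]
    simp
  rw [h1, PySem.Dict.getD_foldl_modify_append]
  simp [List.filter_map, Function.comp_def, List.map_map]

theorem enum_to_zip (psum pxor : List Int) (h : psum.length = pxor.length) :
    (PySem.List.enumerate pxor 0).map (fun p => (PySem.List.pyGetD psum p.1 0, p.2)) = psum.zip pxor := by
  apply List.ext_getElem
  · simp [PySem.List.length_enumerate, h]
  · intro k h1 h2
    simp only [List.getElem_map, PySem.List.getElem_enumerate, zero_add, List.getElem_zip]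
    rw [PySem.List.pyGetD_natCast]
    have hk : k < psum.length := by simp [PySem.List.length_enumerate] at h1; omega
    simp [List.getElem?_eq_getElem hk]

theorem gsum_append (w : List Int) : ∀ (c s x : Int),
    gsum c s (w ++ [x]) = gsum c s w + ((c + (w.length : Int)) * x - (s + w.sum + x)) := by
  induction w with
  | nil => intro c s x; simp [gsum]
  | cons y w ih =>
    intro c s x
    simp only [List.cons_append, gsum, ih, List.length_cons, List.sum_cons]
    push_cast
    ring

theorem ptsum_append (l2 l1 : List (Int × Int)) : ∀ (d : PySem.Dict Int (Int × Int)),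
    ptsum d (l1 ++ l2) = ptsum d l1 + ptsum (l1.foldl aggStep d) l2 := by
  induction l1 with
  | nil => intro d; simp [ptsum]
  | cons p l1 ih => intro d; simp only [List.cons_append, ptsum, List.foldl_cons, ih]; ring

theorem agg_getD (l : List (Int × Int)) : ∀ (d : PySem.Dict Int (Int × Int)) (k : Int),
    (l.foldl aggStep d).getD k (0, 0)
      = ((d.getD k (0, 0)).1 + ((pgroup k l).length : Int), (d.getD k (0, 0)).2 + (pgroup k l).sum) := by
  induction l with
  | nil => intro d k; simp [pgroup]
  | cons p l ih =>
    intro d k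
    simp only [List.foldl_cons, ih]
    by_cases hk : k = p.2
    · subst hk
      simp [aggStep, pgroup]
      constructor <;> ring
    · simp [aggStep, PySem.Dict.getD_insert, hk, pgroup,
        show (p.2 == k) = false by simpa using fun h => hk h.symm]

theorem sum_map_update (ks : List Int) (hn : ks.Nodup) (k0 : Int) (hm : k0 ∈ ks) (f h : Int → Int)
    (hfh : ∀ k ∈ ks, k ≠ k0 → f k = h k) :
    (ks.map h).sum = (ks.map f).sum + (h k0 - f k0) := by
  induction ks with
  | nil => simp at hm
  | cons k ks ih =>
    rcases List.mem_cons.mp hm with rfl | hm'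
    · have : ks.map h = ks.map f := by
        apply List.map_congr_left
        intro x hx
        exact (hfh x (List.mem_cons_of_mem _ hx) (fun he => (List.nodup_cons.mp hn).1 (he ▸ hx))).symm
      simp [this]; ring
    · have hk0 : k ≠ k0 := fun he => (List.nodup_cons.mp hn).1 (he ▸ hm')
      simp only [List.map_cons, List.sum_cons]
      rw [ih (List.nodup_cons.mp hn).2 hm' (fun x hx => hfh x (List.mem_cons_of_mem _ hx)),
        hfh k (List.mem_cons_self) hk0]
      ring

theorem pgroup_append (k : Int) (l : List (Int × Int)) (p : Int × Int) :
    pgroup k (l ++ [p]) = pgroup k l ++ (if p.2 == k then [p.1] else []) := by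
  simp only [pgroup, List.filter_append, List.map_append]
  congr 1
  by_cases h : p.2 = k <;> simp [h]

theorem key_sum (l : List (Int × Int)) :
    ((PySem.Set.ofList (l.map (·.2))).map (fun k => gsum 1 0 (pgroup k l))).sum
      = ptsum PySem.Dict.empty l := by
  induction l using List.reverseRecOn with
  | nil => simp [ptsum]
  | append_singleton l p ih =>
    have hkeys : PySem.Set.ofList ((l ++ [p]).map (·.2))
        = PySem.Set.add (PySem.Set.ofList (l.map (·.2))) p.2 := by
      simp [PySem.Set.ofList_eq_foldl, List.foldl_append]
    have hrhs : ptsum PySem.Dict.empty (l ++ [p])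
        = ptsum PySem.Dict.empty l
          + (((pgroup p.2 l).length : Int) * p.1 - (pgroup p.2 l).sum) := by
      rw [ptsum_append]
      simp [ptsum, agg_getD, PySem.Dict.getD_empty]
    rw [hkeys, hrhs, ← ih]
    by_cases hmem : p.2 ∈ PySem.Set.ofList (l.map (·.2))
    · rw [show PySem.Set.add (PySem.Set.ofList (l.map (·.2))) p.2
          = PySem.Set.ofList (l.map (·.2)) by
        simp [PySem.Set.add, hmem]]
      rw [sum_map_update (PySem.Set.ofList (l.map (·.2))) (PySem.Set.nodup_ofList _)
        p.2 hmem (fun k => gsum 1 0 (pgroup k l)) (fun k => gsum 1 0 (pgroup k (l ++ [p])))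
        (by intro k _ hk
            simp only [pgroup_append]
            simp [show (p.2 == k) = false by simpa using fun h => hk h.symm])]
      rw [pgroup_append]
      simp only [BEq.rfl, if_true]
      rw [gsum_append]
      ring
    · have hgrp : pgroup p.2 l = [] := by
        rw [pgroup, List.filter_eq_nil_iff.mpr, List.map_nil]
        intro q hq hq2
        exact hmem (by rw [PySem.Set.mem_ofList]; exact List.mem_map.mpr ⟨q, hq, by simpa using hq2⟩)
      rw [show PySem.Set.add (PySem.Set.ofList (l.map (·.2))) p.2
          = PySem.Set.ofList (l.map (·.2)) ++ [p.2] by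
        simp [PySem.Set.add, hmem]]
      rw [List.map_append, List.sum_append]
      have h1 : (PySem.Set.ofList (l.map (·.2))).map (fun k => gsum 1 0 (pgroup k (l ++ [p])))
          = (PySem.Set.ofList (l.map (·.2))).map (fun k => gsum 1 0 (pgroup k l)) := by
        apply List.map_congr_left
        intro k hk
        have hk2 : k ≠ p.2 := fun he => hmem (he ▸ hk)
        rw [pgroup_append]
        simp [show (p.2 == k) = false by simpa using fun h => hk2 h.symm]
      rw [h1]
      simp only [List.map_cons, List.map_nil, List.sum_cons, List.sum_nil, pgroup_append, hgrp]
      simp [gsum]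

theorem smart_eq (a : List Int) :
    smart a = PySem.Int.mod
      (ptsum PySem.Dict.empty ((List.scanl (· + ·) 0 a).zip (List.scanl PySem.Int.bxor 0 a))) MOD := by
  have hlen : (List.scanl (· + ·) (0:Int) a).length = (List.scanl PySem.Int.bxor 0 a).length := by
    simp [List.length_scanl]
  simp only [smart]
  set psum := List.scanl (· + ·) (0:Int) a with hpsum
  set pxor := List.scanl PySem.Int.bxor (0:Int) a with hpxor
  have hnodup : (((PySem.List.enumerate pxor).foldl
      (fun d p => d.modify p.2 [] (fun v => v ++ [p.1])) PySem.Dict.empty)).keys.Nodup := by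
    exact PySem.Dict.nodup_keys_foldl_modify_key _ (fun p : Int × Int => p.2) []
      (fun _ p v => v ++ [p.1]) _ (by simp [PySem.Dict.keys_empty])
  have hkeys : (((PySem.List.enumerate pxor).foldl
      (fun d p => d.modify p.2 [] (fun v => v ++ [p.1])) PySem.Dict.empty)).keys
      = PySem.Set.ofList pxor := by
    have h := PySem.Dict.keys_foldl_modify_key (PySem.List.enumerate pxor)
      (fun p => p.2) ([] : List Int) (fun d p v => v ++ [p.1]) PySem.Dict.empty
    beta_reduce at h
    rw [h]
    simp [PySem.List.map_snd_enumerate, PySem.Set.ofList_eq_foldl, PySem.Set.update]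
  rw [PySem.Dict.values_eq_map_keys _ hnodup [], hkeys]
  have hA := A_outer psum ((PySem.Set.ofList pxor).map (fun k =>
      ((PySem.List.enumerate pxor).foldl (fun d p => d.modify p.2 [] (fun v => v ++ [p.1]))
        PySem.Dict.empty).getD k [])) 0
  rw [modM_zero] at hA
  simp only [zero_add] at hA
  rw [hA]
  congr 1
  rw [← key_sum, List.map_map]
  have hmsnd : (psum.zip pxor).map (·.2) = pxor := by
    apply List.map_snd_zip
    omega
  rw [hmsnd]
  congr 1
  apply List.map_congr_left
  intro k hk
  simp only [Function.comp_def]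
  rw [getD_buildIdx]
  congr 1
  rw [← enum_to_zip psum pxor hlen]
  simp [pgroup, List.filter_map, List.map_map, Function.comp_def]

-- ===== VERDICT (by name: the statement is the Claim_ definition above) =====
theorem smart_spec : Claim_equal_smart := by
  intro a _
  unfold Spec_smart
  rw [smart_eq, smart_alt_eq]
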